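-- pv_equiv track=rewrite | github.com/dawnandrew100/Advent_of_Code | 2015/Day 11/Python/main.py | rectify
-- ===== SOURCE A (Python) =====
-- def next_char(input: str) -> str:
--   return chr((((ord(input)+1) - 97) % 26) + 97)
--
-- def rectify(input: str) -> str:
--   output = input
--   banned = ["i","o","l"]
--   for letter in banned:
--     if letter in output:
--       chosen_one = output.index(letter)
--       diff = len(output) - len(output[:chosen_one]) - 1
--       output = list(output[:chosen_one]) + [next_char(output[chosen_one])] +(["a"]*diff)
--   return "".join(output)
-- ===== SOURCE B (Python) =====
-- def next_char(input: str) -> str: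
--   return chr((((ord(input)+1) - 97) % 26) + 97)
--
-- def rectify(input: str) -> str:
--   # single left-to-right scan: advance the leftmost banned letter, fill the rest with 'a'
--   for i, ch in enumerate(input):
--     if ch in "iol":
--       return input[:i] + next_char(ch) + "a" * (len(input) - i - 1)
--   return input
-- ===== Notes on version B (the rewrite author's own statement) =====
-- stated objective: idiomatic
-- what changed: B replaces A's three sequential per-letter index-and-rebuild passes with a single left-to-right scan that advances the leftmost banned character and pads the tail.
import Mathlib
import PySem

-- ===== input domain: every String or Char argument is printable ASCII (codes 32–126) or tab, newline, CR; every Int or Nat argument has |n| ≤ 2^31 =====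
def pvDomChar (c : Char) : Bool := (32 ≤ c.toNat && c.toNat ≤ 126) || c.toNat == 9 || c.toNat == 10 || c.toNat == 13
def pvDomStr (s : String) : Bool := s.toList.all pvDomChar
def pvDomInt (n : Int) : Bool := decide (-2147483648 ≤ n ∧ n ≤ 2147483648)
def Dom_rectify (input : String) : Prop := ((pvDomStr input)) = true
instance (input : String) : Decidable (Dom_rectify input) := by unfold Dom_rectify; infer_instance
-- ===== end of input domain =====

-- B changes A's three per-letter index-and-rebuild passes into one left-to-right scan; return values proved equal on all inputs.

-- ===== PORT A =====
def nextChar (c : Char) : Char :=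
  Char.ofNat ((PySem.Int.mod (((c.toNat : Int) + 1) - 97) 26 + 97).toNat)

-- one iteration of A's `for letter in banned` loop body
def passA (letter : Char) (output : List Char) : List Char :=
  if letter ∈ output then
    let chosen_one := (PySem.List.index? output letter).getD 0
    let diff := output.length - (PySem.List.slice output none (some (chosen_one : Int))).length - 1
    PySem.List.slice output none (some (chosen_one : Int))
      ++ [nextChar ((PySem.List.pyGet? output (chosen_one : Int)).getD ' ')]
      ++ List.replicate diff 'a'
  else output

def rectify (input : String) : String :=
  String.mk (['i', 'o', 'l'].foldl (fun out letter => passA letter out) input.toList)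

-- ===== PORT B =====
-- single scan: advance the leftmost banned char, fill the rest with 'a'
def scanB : List Char → List Char
  | [] => []
  | x :: xs =>
    if x = 'i' ∨ x = 'o' ∨ x = 'l' then nextChar x :: List.replicate xs.length 'a'
    else x :: scanB xs

def rectify_alt (input : String) : String := String.mk (scanB input.toList)

-- ===== PRECONDITION & SPEC =====
def Spec_rectify (input : String) (out : String) : Prop := out = rectify_alt input
instance (input : String) (out : String) : Decidable (Spec_rectify input out) := by unfold Spec_rectify; infer_instance

-- ===== CLAIM (what is proved, stated in full; the proofs are below) =====
def Claim_equal_rectify : Prop := ∀ (input : String), Dom_rectify input → Spec_rectify input (rectify input)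

-- ===== LEMMAS AND PROOFS =====

-- head-recursive characterisation of A's pass
def passRec (letter : Char) : List Char → List Char
  | [] => []
  | x :: xs =>
    if x = letter then nextChar letter :: List.replicate xs.length 'a'
    else x :: passRec letter xs

theorem passA_not_mem (letter : Char) (l : List Char) (h : letter ∉ l) :
    passA letter l = l := by
  simp [passA, h]

theorem passA_mem (letter : Char) (pre suf : List Char) (h : letter ∉ pre) :
    passA letter (pre ++ letter :: suf) = pre ++ nextChar letter :: List.replicate suf.length 'a' := by
  have hidx : PySem.List.index? (pre ++ letter :: suf) letter = some pre.length :=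
    (PySem.List.index?_eq_some_iff _ _ _).2 ⟨pre, suf, rfl, rfl, h⟩
  have hmem : letter ∈ pre ++ letter :: suf := by simp
  simp only [passA, if_pos hmem, hidx, Option.getD_some]
  rw [PySem.List.slice_to_natCast, PySem.List.pyGet?_natCast]
  simp

theorem passA_eq_passRec (letter : Char) (l : List Char) :
    passA letter l = passRec letter l := by
  induction l with
  | nil => simp [passA, passRec]
  | cons x xs ih =>
    by_cases hx : x = letter
    · subst hx
      have := passA_mem x [] xs (by simp)
      simpa [passRec] using this
    · rw [passRec, if_neg hx, ← ih]
      by_cases hm : letter ∈ xs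
      · obtain ⟨k, hk⟩ := Option.isSome_iff_exists.1 ((PySem.List.index?_isSome_iff xs letter).2 hm)
        obtain ⟨pre, suf, hdec, hlen, hpre⟩ := (PySem.List.index?_eq_some_iff _ _ _).1 hk
        subst hdec
        have h1 : passA letter (x :: (pre ++ letter :: suf)) =
            (x :: pre) ++ nextChar letter :: List.replicate suf.length 'a' := by
          have : letter ∉ x :: pre := by
            intro hc
            rcases List.mem_cons.1 hc with hc | hc
            · exact hx hc.symm
            · exact hpre hc
          simpa using passA_mem letter (x :: pre) suf this
        rw [h1, passA_mem letter pre suf hpre]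
        simp
      · rw [passA_not_mem letter xs hm, passA_not_mem letter (x :: xs) (by simp [hm]; exact fun hc => hx hc.symm)]

theorem passRec_not_mem (letter : Char) (l : List Char) (h : letter ∉ l) :
    passRec letter l = l := by
  induction l with
  | nil => rfl
  | cons x xs ih =>
    have hx : x ≠ letter := fun hc => h (hc ▸ List.mem_cons_self ..)
    rw [passRec, if_neg hx, ih (fun hc => h (List.mem_cons_of_mem _ hc))]

theorem passRec_replicate_a (letter : Char) (n : Nat) (h : letter ≠ 'a') :
    passRec letter (List.replicate n 'a') = List.replicate n 'a' := by
  apply passRec_not_mem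
  simp [List.mem_replicate]
  intro _ hc
  exact h hc

theorem passRec_length (letter : Char) (l : List Char) :
    (passRec letter l).length = l.length := by
  induction l with
  | nil => rfl
  | cons x xs ih =>
    rw [passRec]
    split_ifs with h
    · simp
    · simp [ih]

theorem scanB_eq_passes (l : List Char) :
    passRec 'l' (passRec 'o' (passRec 'i' l)) = scanB l := by
  induction l with
  | nil => rfl
  | cons x xs ih =>
    by_cases hi : x = 'i'
    · subst hi
      rw [scanB, if_pos (by left; rfl)]
      rw [passRec, if_pos rfl]
      have hj : nextChar 'i' = 'j' := by decide
      rw [hj, passRec, if_neg (by decide), passRec_replicate_a 'o' _ (by decide)]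
      rw [passRec, if_neg (by decide), passRec_replicate_a 'l' _ (by decide)]
    · by_cases ho : x = 'o'
      · subst ho
        rw [scanB, if_pos (by right; left; rfl)]
        rw [passRec, if_neg (by decide)]
        rw [passRec, if_pos rfl]
        have hp : nextChar 'o' = 'p' := by decide
        rw [hp, passRec_length, passRec, if_neg (by decide), passRec_replicate_a 'l' _ (by decide)]
      · by_cases hl : x = 'l'
        · subst hl
          rw [scanB, if_pos (by right; right; rfl)]
          rw [passRec, if_neg (by decide)]
          rw [passRec, if_neg (by decide)]
          rw [passRec, if_pos rfl]
          have hm : nextChar 'l' = 'm' := by decide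
          rw [hm, passRec_length, passRec_length]
        · rw [scanB, if_neg (by simp [hi, ho, hl])]
          rw [passRec, if_neg hi, passRec, if_neg ho, passRec, if_neg hl, ih]

-- ===== VERDICT (by name: the statement is the Claim_ definition above) =====
theorem rectify_spec : Claim_equal_rectify := by
  intro input _
  unfold Spec_rectify rectify rectify_alt
  simp only [List.foldl]
  rw [passA_eq_passRec, passA_eq_passRec, passA_eq_passRec, scanB_eq_passes]
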